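-- pv_equiv track=rewrite | github.com/jasperdiks1979-star/Getpawsy | engines/publish_engine.py | generate_picture_tag
-- ===== SOURCE A (Python) =====
-- def generate_picture_tag(images):
--     if not images:
--         return None
--
--     picture_html = '<picture class="hero-picture">\n'
--
--     breakpoints = [
--         (3840, "5k"),
--         (3440, "4k-ultrawide"),
--         (2560, "ultrawide"),
--         (1920, "desktop"),
--         (1600, "tablet"),
--         (1080, "mobile")
--     ]
--
--     for max_width, size_name in breakpoints:
--         matching = [img for img in images if size_name in img.lower() or str(max_width) in img]
--         if matching:
--             img_path = f"/public/images/hero/{matching[0]}"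
--             picture_html += f'  <source media="(max-width: {max_width}px)" srcset="{img_path}">\n'
--
--     default_image = images[0] if images else "hero-default.jpg"
--     picture_html += f'  <img src="/public/images/hero/{default_image}" alt="GetPawsy Hero" loading="lazy">\n'
--     picture_html += '</picture>'
--
--     return picture_html
-- ===== SOURCE B (Python) =====
-- def generate_picture_tag(images):
--     if not images:
--         return None
--
--     breakpoints = [
--         (3840, "5k"),
--         (3440, "4k-ultrawide"),
--         (2560, "ultrawide"),
--         (1920, "desktop"),
--         (1600, "tablet"),
--         (1080, "mobile")
--     ]
--
--     # single pass: remember the FIRST image matching each breakpoint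
--     first = {}
--     for img in images:
--         low = img.lower()
--         for max_width, size_name in breakpoints:
--             if (max_width, size_name) not in first and (size_name in low or str(max_width) in img):
--                 first[(max_width, size_name)] = img
--
--     picture_html = '<picture class="hero-picture">\n'
--     for max_width, size_name in breakpoints:
--         if (max_width, size_name) in first:
--             img_path = f"/public/images/hero/{first[(max_width, size_name)]}"
--             picture_html += f'  <source media="(max-width: {max_width}px)" srcset="{img_path}">\n'
--     picture_html += f'  <img src="/public/images/hero/{images[0]}" alt="GetPawsy Hero" loading="lazy">\n'
--     picture_html += '</picture>'
--     return picture_html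
-- ===== Notes on version B (the rewrite author's own statement) =====
-- stated objective: alternative
-- what changed: Replaces A's per-breakpoint filter of the whole image list with a single pass over the images that records the first matching image per breakpoint in a dict, then emits <source> lines in breakpoint order.
import Mathlib
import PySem

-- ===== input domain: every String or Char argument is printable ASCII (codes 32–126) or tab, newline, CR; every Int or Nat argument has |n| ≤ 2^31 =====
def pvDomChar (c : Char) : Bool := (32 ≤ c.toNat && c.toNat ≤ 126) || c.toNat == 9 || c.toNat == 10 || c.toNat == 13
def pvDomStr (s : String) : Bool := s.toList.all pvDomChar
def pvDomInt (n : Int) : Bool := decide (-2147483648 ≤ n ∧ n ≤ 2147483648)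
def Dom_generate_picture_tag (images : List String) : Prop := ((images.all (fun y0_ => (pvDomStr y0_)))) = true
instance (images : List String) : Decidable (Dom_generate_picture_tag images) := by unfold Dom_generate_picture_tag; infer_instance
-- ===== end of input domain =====

-- B replaces the per-breakpoint filter of the whole image list by a single pass over the
-- images that records the first matching image per breakpoint in a dict (alternative, same cost).

-- shared literal data and the match predicate (identical in A and B)
def pvBreakpoints : List (Int × String) :=
  [(3840, "5k"), (3440, "4k-ultrawide"), (2560, "ultrawide"),
   (1920, "desktop"), (1600, "tablet"), (1080, "mobile")]

def pvMatch (max_width : Int) (size_name : String) (img : String) : Bool :=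
  PySem.Str.isIn size_name (PySem.Str.lower img) || PySem.Str.isIn (PySem.Int.toStr max_width) img

def pvSourceLine (max_width : Int) (img : String) : String :=
  "  <source media=\"(max-width: " ++ PySem.Int.toStr max_width ++ "px)\" srcset=\"/public/images/hero/" ++ img ++ "\">\n"

-- ===== PORT A =====
def generate_picture_tag (images : List String) : Option String :=
  if images = [] then none
  else
    let picture_html := "<picture class=\"hero-picture\">\n"
    let picture_html := pvBreakpoints.foldl (fun acc p =>
      let matching := images.filter (fun img => pvMatch p.1 p.2 img)
      match matching with
      | [] => acc
      | m :: _ => acc ++ pvSourceLine p.1 m) picture_html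
    let default_image := match images with
      | [] => "hero-default.jpg"
      | d :: _ => d
    some (picture_html ++ "  <img src=\"/public/images/hero/" ++ default_image ++
      "\" alt=\"GetPawsy Hero\" loading=\"lazy\">\n" ++ "</picture>")

-- ===== PORT B =====
def pvStep (d : PySem.Dict (Int × String) String) (img : String) : PySem.Dict (Int × String) String :=
  let low := PySem.Str.lower img
  pvBreakpoints.foldl (fun d p =>
    if !(d.contains p) && (PySem.Str.isIn p.2 low || PySem.Str.isIn (PySem.Int.toStr p.1) img)
    then d.insert p img else d) d

def generate_picture_tag_alt (images : List String) : Option String :=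
  if images = [] then none
  else
    let first := images.foldl pvStep PySem.Dict.empty
    let picture_html := "<picture class=\"hero-picture\">\n"
    let picture_html := pvBreakpoints.foldl (fun acc p =>
      match first.get? p with
      | some img => acc ++ pvSourceLine p.1 img
      | none => acc) picture_html
    let default_image := match images with
      | [] => "hero-default.jpg"
      | d :: _ => d
    some (picture_html ++ "  <img src=\"/public/images/hero/" ++ default_image ++
      "\" alt=\"GetPawsy Hero\" loading=\"lazy\">\n" ++ "</picture>")

-- ===== PRECONDITION & SPEC =====
def Spec_generate_picture_tag (images : List String) (out : Option String) : Prop := out = generate_picture_tag_alt images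
instance (images : List String) (out : Option String) : Decidable (Spec_generate_picture_tag images out) := by unfold Spec_generate_picture_tag; infer_instance

-- ===== CLAIM (what is proved, stated in full; the proofs are below) =====
def Claim_equal_generate_picture_tag : Prop := ∀ (images : List String), Dom_generate_picture_tag images → Spec_generate_picture_tag images (generate_picture_tag images)

-- ===== LEMMAS AND PROOFS =====

-- the inner per-image fold never re-fills a key already present
theorem pvInner_get?_of_not_mem (bs : List (Int × String)) (img : String) (p : Int × String)
    (d : PySem.Dict (Int × String) String) (h : p ∉ bs) :
    ((bs.foldl (fun d q =>
       if !(d.contains q) && pvMatch q.1 q.2 img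
       then d.insert q img else d) d).get? p) = d.get? p := by
  induction bs generalizing d with
  | nil => rfl
  | cons q rest ih =>
    simp only [List.mem_cons, not_or] at h
    simp only [List.foldl_cons]
    rw [ih _ h.2]
    split_ifs with hc
    · exact PySem.Dict.get?_insert_of_ne _ _ h.1
    · rfl

-- the effect of the inner fold on one key
theorem pvInner_get? (bs : List (Int × String)) (img : String) (p : Int × String)
    (d : PySem.Dict (Int × String) String) (hnd : bs.Nodup) :
    ((bs.foldl (fun d q =>
       if !(d.contains q) && pvMatch q.1 q.2 img
       then d.insert q img else d) d).get? p) =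
    if p ∈ bs ∧ d.contains p = false ∧ pvMatch p.1 p.2 img = true then some img else d.get? p := by
  induction bs generalizing d with
  | nil => simp
  | cons q rest ih =>
    rcases List.nodup_cons.mp hnd with ⟨hq, hrest⟩
    simp only [List.foldl_cons]
    by_cases hpq : p = q
    · subst hpq
      rw [pvInner_get?_of_not_mem rest img p _ hq]
      by_cases hc : d.contains p = false
      · by_cases hm : pvMatch p.1 p.2 img = true
        · rw [if_pos (by simp [hc, hm])]
          rw [if_pos ⟨List.mem_cons_self, hc, hm⟩]
          exact PySem.Dict.get?_insert_self _ _ _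
        · simp only [Bool.not_eq_true] at hm
          rw [if_neg (by simp [hm])]
          simp [hm]
      · simp only [Bool.not_eq_false] at hc
        rw [if_neg (by simp [hc])]
        simp [hc]
    · rw [ih _ hrest]
      have hg : (if !(d.contains q) && pvMatch q.1 q.2 img
           then d.insert q img else d).get? p = d.get? p := by
        split_ifs with hcq
        · exact PySem.Dict.get?_insert_of_ne _ _ hpq
        · rfl
      have hcp : (if !(d.contains q) && pvMatch q.1 q.2 img
           then d.insert q img else d).contains p = d.contains p := by
        split_ifs with hcq
        · rw [PySem.Dict.contains_insert]
          simp [show (p == q) = false from by simpa using hpq]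
        · rfl
      rw [hg, hcp]
      simp [hpq]

-- the outer fold computes, per breakpoint, the FIRST matching image (A's matching[0])
theorem pvOuter_get? (images : List String) (p : Int × String) (hp : p ∈ pvBreakpoints)
    (d : PySem.Dict (Int × String) String) :
    ((images.foldl pvStep d).get? p) =
    match d.get? p with
    | some v => some v
    | none => (images.filter (fun img => pvMatch p.1 p.2 img)).head? := by
  induction images generalizing d with
  | nil => cases h : d.get? p <;> simp [h]
  | cons img rest ih =>
    have hnd : pvBreakpoints.Nodup := by decide
    simp only [List.foldl_cons]
    rw [ih]
    rw [show ((pvStep d img).get? p) =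
        (if p ∈ pvBreakpoints ∧ d.contains p = false ∧ pvMatch p.1 p.2 img = true
         then some img else d.get? p) from pvInner_get? pvBreakpoints img p d hnd]
    by_cases hc : d.get? p = none
    · have hcont : d.contains p = false := by
        rw [PySem.Dict.contains_eq_isSome_get?, hc]; rfl
      by_cases hm : pvMatch p.1 p.2 img = true
      · simp [hp, hcont, hm, hc]
      · simp only [Bool.not_eq_true] at hm
        simp [hp, hcont, hm, hc]
    · rcases Option.ne_none_iff_exists'.mp hc with ⟨v, hv⟩
      have hcont : d.contains p = true := by
        rw [PySem.Dict.contains_eq_isSome_get?, hv]; rfl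
      simp [hv, hcont]

-- ===== VERDICT (by name: the statement is the Claim_ definition above) =====
theorem generate_picture_tag_spec : Claim_equal_generate_picture_tag := by
  intro images _
  unfold Spec_generate_picture_tag generate_picture_tag generate_picture_tag_alt
  by_cases h : images = []
  · simp [h]
  · simp only [if_neg h]
    have hfold : pvBreakpoints.foldl (fun acc p =>
        match images.filter (fun img => pvMatch p.1 p.2 img) with
        | [] => acc
        | m :: _ => acc ++ pvSourceLine p.1 m) "<picture class=\"hero-picture\">\n"
        = pvBreakpoints.foldl (fun acc p =>
        match (images.foldl pvStep PySem.Dict.empty).get? p with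
        | some img => acc ++ pvSourceLine p.1 img
        | none => acc) "<picture class=\"hero-picture\">\n" := by
      apply PySem.List.foldl_congr_mem
      intro acc p hp
      have hg := pvOuter_get? images p hp PySem.Dict.empty
      rw [PySem.Dict.get?_empty] at hg
      rw [hg]
      cases hf : images.filter (fun img => pvMatch p.1 p.2 img) with
      | nil => simp
      | cons x xs => simp
    rw [hfold]
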